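-- pv_equiv track=rewrite | github.com/Asgavar/studia | semestr_1_zima_2017_18/wdpp/lista02/l02z02/strategie.py | szesc_niemalejacy
-- ===== SOURCE A (Python) =====
-- def szesc_niemalejacy(rzuty) -> bool:
--     for i in range(len(rzuty) - 5):
--         dobrych_wyrazow = 1
--         for j in range(6):
--             if dobrych_wyrazow == 6:
--                 return True
--             if rzuty[i+j+1] >= rzuty[i+j]:
--                 dobrych_wyrazow += 1
--             else:
--                 break
--     return False
-- ===== SOURCE B (Python) =====
-- def szesc_niemalejacy(rzuty) -> bool:
--     run = 1
--     for prev, cur in zip(rzuty, rzuty[1:]):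
--         run = run + 1 if cur >= prev else 1
--         if run == 6:
--             return True
--     return False
-- ===== Notes on version B (the rewrite author's own statement) =====
-- stated objective: simpler
-- what changed: Replaced the nested window-rescan (each start index re-checks up to 5 adjacent pairs with a per-window counter) by a single pass over adjacent pairs maintaining one persistent run-length counter that resets on a decrease and returns True when it reaches 6.
import Mathlib
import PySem

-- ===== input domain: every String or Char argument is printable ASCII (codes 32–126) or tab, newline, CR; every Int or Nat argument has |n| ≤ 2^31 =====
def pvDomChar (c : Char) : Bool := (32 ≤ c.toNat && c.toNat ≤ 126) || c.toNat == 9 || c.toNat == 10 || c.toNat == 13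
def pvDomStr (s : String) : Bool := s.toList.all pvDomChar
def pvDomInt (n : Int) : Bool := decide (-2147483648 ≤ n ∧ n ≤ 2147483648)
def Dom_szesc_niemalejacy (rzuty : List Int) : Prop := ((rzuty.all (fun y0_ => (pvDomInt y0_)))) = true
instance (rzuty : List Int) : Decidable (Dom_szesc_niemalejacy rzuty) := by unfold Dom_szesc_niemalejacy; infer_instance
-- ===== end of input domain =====

-- B replaces A's nested window-rescan by one pass with a persistent run-length counter (simpler).


-- ===== PORT A =====
-- inner 'for j in range(6)' with state dobrych_wyrazow; 'break' yields false to the outer loop.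
-- The index accesses are provably always in range (i ≤ len-6, j ≤ 4 when an access happens),
-- so the IndexError arm of the match is unreachable.
def szescInnerA (rzuty : List Int) (i : Int) : List Int → Int → Bool
  | [], _ => false
  | j :: rest, dobrych =>
    if dobrych == 6 then true
    else
      match PySem.List.pyGet? rzuty (i + j + 1), PySem.List.pyGet? rzuty (i + j) with
      | some a, some b => if a ≥ b then szescInnerA rzuty i rest (dobrych + 1) else false
      | _, _ => false   -- IndexError (unreachable on A's actual index range)

-- outer 'for i in range(len(rzuty) - 5)' with early return True
def szescOuterA (rzuty : List Int) : List Int → Bool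
  | [] => false
  | i :: rest =>
    if szescInnerA rzuty i (PySem.List.pyRange 0 6 1) 1 then true
    else szescOuterA rzuty rest

def szesc_niemalejacy (rzuty : List Int) : Bool :=
  szescOuterA rzuty (PySem.List.pyRange 0 ((rzuty.length : Int) - 5) 1)

-- ===== PORT B =====
-- single pass over zip(rzuty, rzuty[1:]) with a persistent run counter, early return at 6
def szescRunB : List (Int × Int) → Int → Bool
  | [], _ => false
  | (prev, cur) :: rest, run =>
    let run' := if cur ≥ prev then run + 1 else 1
    if run' == 6 then true else szescRunB rest run'

def szesc_niemalejacy_alt (rzuty : List Int) : Bool :=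
  szescRunB (List.zip rzuty (rzuty.drop 1)) 1

-- ===== PRECONDITION & SPEC =====
def Spec_szesc_niemalejacy (rzuty : List Int) (out : Bool) : Prop := out = szesc_niemalejacy_alt rzuty
instance (rzuty : List Int) (out : Bool) : Decidable (Spec_szesc_niemalejacy rzuty out) := by unfold Spec_szesc_niemalejacy; infer_instance

-- ===== CLAIM (what is proved, stated in full; the proofs are below) =====
def Claim_equal_szesc_niemalejacy : Prop := ∀ (rzuty : List Int), Dom_szesc_niemalejacy rzuty → Spec_szesc_niemalejacy rzuty (szesc_niemalejacy rzuty)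

-- ===== LEMMAS AND PROOFS =====

-- common characterisation: some window of 6 consecutive elements is non-decreasing
def chain6 : List Int → Bool
  | a :: b :: c :: d :: e :: f :: _ => a ≤ b && b ≤ c && c ≤ d && d ≤ e && e ≤ f
  | _ => false

def sub6 : List Int → Bool
  | [] => false
  | x :: t => chain6 (x :: t) || sub6 t

def streak : Int → List Int → Nat
  | _, [] => 0
  | prev, x :: xs => if prev ≤ x then streak x xs + 1 else 0

lemma chain6_short (l : List Int) (h : l.length < 6) : chain6 l = false := by
  rcases l with _ | ⟨a, _ | ⟨b, _ | ⟨c, _ | ⟨d, _ | ⟨e, _ | ⟨f, t⟩⟩⟩⟩⟩⟩ <;>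
    simp [chain6] at * <;> omega

lemma chain6_cons_iff (x : Int) (t : List Int) :
    chain6 (x :: t) = true ↔ 5 ≤ streak x t := by
  rcases t with _ | ⟨b, _ | ⟨c, _ | ⟨d, _ | ⟨e, _ | ⟨f, r⟩⟩⟩⟩⟩ <;>
    simp [chain6, streak] <;> split_ifs <;> simp_all

lemma chain6_eq_decide (x : Int) (t : List Int) :
    chain6 (x :: t) = decide (5 ≤ streak x t) := by
  cases hch : chain6 (x :: t)
  · rw [eq_comm, decide_eq_false_iff_not]
    intro h
    rw [(chain6_cons_iff x t).mpr h] at hch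
    cases hch
  · simp [(chain6_cons_iff x t).mp hch]

-- ===== A side =====

lemma outerA_any (rzuty : List Int) (is : List Int) :
    szescOuterA rzuty is = is.any (fun i => szescInnerA rzuty i (PySem.List.pyRange 0 6 1) 1) := by
  induction is with
  | nil => simp [szescOuterA]
  | cons i rest ih =>
    simp only [szescOuterA, List.any_cons, ih]
    by_cases h : szescInnerA rzuty i (PySem.List.pyRange 0 6 1) 1 = true <;> simp [h]

lemma innerA_eval (l : List Int) (k : Nat) (h : k + 6 ≤ l.length) :
    szescInnerA l (k : Int) (PySem.List.pyRange 0 6 1) 1 = chain6 (l.drop k) := by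
  have hlen : 6 ≤ (l.drop k).length := by simp; omega
  rcases hd : l.drop k with _ | ⟨a, _ | ⟨b, _ | ⟨c, _ | ⟨d, _ | ⟨e, _ | ⟨f, r⟩⟩⟩⟩⟩⟩ <;>
    rw [hd] at hlen <;> simp at hlen
  have q : ∀ (i : Int) (j : Nat), i = (k : Int) + j →
      PySem.List.pyGet? l i = (a :: b :: c :: d :: e :: f :: r)[j]? := by
    intro i j hi
    rw [hi, show ((k : Int) + (j : Nat)) = ((k + j : Nat) : Int) from by push_cast; ring,
        PySem.List.pyGet?_natCast, ← List.getElem?_drop, hd]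
  have hr : PySem.List.pyRange 0 6 1 = [0, 1, 2, 3, 4, 5] := by decide
  rw [hr]
  simp only [szescInnerA, chain6]
  rw [q ((k : Int) + 0 + 1) 1 (by push_cast; ring), q ((k : Int) + 0) 0 (by push_cast; ring),
      q ((k : Int) + 1 + 1) 2 (by push_cast; ring), q ((k : Int) + 1) 1 (by push_cast; ring),
      q ((k : Int) + 2 + 1) 3 (by push_cast; ring), q ((k : Int) + 2) 2 (by push_cast; ring),
      q ((k : Int) + 3 + 1) 4 (by push_cast; ring), q ((k : Int) + 3) 3 (by push_cast; ring),
      q ((k : Int) + 4 + 1) 5 (by push_cast; ring), q ((k : Int) + 4) 4 (by push_cast; ring)]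
  simp only [List.getElem?_cons_zero, List.getElem?_cons_succ]
  norm_num
  simp [Bool.and_assoc]

lemma sub6_eq_any (l : List Int) :
    sub6 l = (List.range (l.length - 5)).any (fun k => chain6 (l.drop k)) := by
  induction l with
  | nil => simp [sub6]
  | cons x t ih =>
    by_cases h : t.length < 5
    · have h1 : (x :: t).length - 5 = 0 := by simp; omega
      have h2 : t.length - 5 = 0 := by omega
      rw [h1]
      simp [sub6, chain6_short (x :: t) (by simp; omega), ih, h2]
    · have h1 : (x :: t).length - 5 = (t.length - 5) + 1 := by simp; omega
      rw [h1, List.range_succ_eq_map]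
      simp only [List.any_cons, List.any_map, List.drop_zero, sub6, ih]
      congr 1

lemma szescA_eq_sub6 (l : List Int) : szesc_niemalejacy l = sub6 l := by
  rw [szesc_niemalejacy, outerA_any, sub6_eq_any]
  rw [PySem.List.pyRange_one]
  have ht : ((l.length : Int) - 5 - 0).toNat = l.length - 5 := by omega
  rw [ht, List.any_map]
  apply PySem.List.any_congr_mem
  intro k hk
  have hk' : k < l.length - 5 := List.mem_range.mp hk
  have : ((0 : Int) + (k : Int)) = (k : Int) := by ring
  simp only [Function.comp, this]
  exact innerA_eval l k (by omega)

-- ===== B side =====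

lemma runB_eval (xs : List Int) : ∀ (prev run : Int), 1 ≤ run → run ≤ 5 →
    szescRunB (List.zip (prev :: xs) xs) run
      = (decide (6 ≤ run + (streak prev xs : Int)) || sub6 xs) := by
  induction xs with
  | nil => intro prev run h1 h5; simp [szescRunB, sub6, streak]; omega
  | cons x t ih =>
    intro prev run h1 h5
    simp only [List.zip_cons_cons, szescRunB, streak]
    by_cases hc : x ≥ prev
    · rw [if_pos hc]
      by_cases h6 : run + 1 = 6
      · have : (run + 1 == 6) = true := by simp [h6]
        rw [this]
        simp only [if_true]
        have hs : prev ≤ x := hc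
        simp [hs]
        omega
      · have : (run + 1 == 6) = false := by simp [h6]
        rw [this]
        simp only [Bool.false_eq_true, if_false]
        rw [ih x (run + 1) (by omega) (by omega)]
        have hs : prev ≤ x := hc
        simp only [sub6, hs]
        by_cases hch : chain6 (x :: t) = true
        · have := (chain6_cons_iff x t).mp hch
          have d1 : decide (6 ≤ run + 1 + (streak x t : Int)) = true := by
            simp; omega
          simp [d1, hch]
        · simp only [Bool.not_eq_true] at hch
          simp only [hch, Bool.false_or]
          congr 1
          simp only [decide_eq_decide]
          push_cast; omega
    · rw [if_neg hc]
      have : ((1 : Int) == 6) = false := by decide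
      rw [this]
      simp only [Bool.false_eq_true, if_false]
      rw [ih x 1 (by omega) (by omega)]
      have hs : ¬ prev ≤ x := by omega
      simp only [sub6, if_neg hs, Nat.cast_zero, add_zero]
      have d0 : decide (6 ≤ run) = false := by simp; omega
      rw [d0, Bool.false_or, chain6_eq_decide]
      congr 1
      simp only [decide_eq_decide]
      omega

lemma szescB_eq_sub6 (l : List Int) : szesc_niemalejacy_alt l = sub6 l := by
  rcases l with _ | ⟨x, xs⟩
  · simp [szesc_niemalejacy_alt, szescRunB, sub6]
  · rw [szesc_niemalejacy_alt]
    simp only [List.drop_succ_cons, List.drop_zero]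
    rw [runB_eval xs x 1 (by omega) (by omega)]
    simp only [sub6]
    rw [chain6_eq_decide]
    congr 1
    simp only [decide_eq_decide]
    omega

-- ===== VERDICT (by name: the statement is the Claim_ definition above) =====
theorem szesc_niemalejacy_spec : Claim_equal_szesc_niemalejacy := by
  intro rzuty _
  unfold Spec_szesc_niemalejacy
  rw [szescA_eq_sub6, szescB_eq_sub6]
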